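-- pv_equiv track=rewrite | github.com/LeeHyungi0622/Python-Algorithm-Repository | programmers_test_2-2.py | solution
-- ===== SOURCE A (Python) =====
-- from collections import defaultdict
--
-- def solution(topping):
--     answer = 0
--     yb = defaultdict(int)
--     ob = defaultdict(bool)
--
--     for t in topping:
--         yb[t] = yb.get(t, 0) + 1
--
--     for t in topping:
--         yb[t] -= 1
--         ob[t] = True
--
--         if yb[t] == 0:
--             del yb[t]
--
--         if len(yb) == len(ob):
--             answer += 1
--
--     return answer
-- ===== SOURCE B (Python) =====
-- def solution(topping):
--     pref = []
--     seen = set()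
--     for t in topping:
--         seen.add(t)
--         pref.append(len(seen))
--     suf = [0]
--     seen = set()
--     for t in reversed(topping):
--         seen.add(t)
--         suf.append(len(seen))
--     suf.reverse()
--     answer = 0
--     for i in range(len(topping)):
--         if pref[i] == suf[i + 1]:
--             answer += 1
--     return answer
-- ===== Notes on version B (the rewrite author's own statement) =====
-- stated objective: alternative
-- what changed: Replaced the single incremental pass that maintains a shrinking Counter (with in-place deletion) and a growing seen-dict by two table-building passes (prefix distinct counts forward, suffix distinct counts backward over the reversed list) followed by one comparison pass over the indices.
import Mathlib
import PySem

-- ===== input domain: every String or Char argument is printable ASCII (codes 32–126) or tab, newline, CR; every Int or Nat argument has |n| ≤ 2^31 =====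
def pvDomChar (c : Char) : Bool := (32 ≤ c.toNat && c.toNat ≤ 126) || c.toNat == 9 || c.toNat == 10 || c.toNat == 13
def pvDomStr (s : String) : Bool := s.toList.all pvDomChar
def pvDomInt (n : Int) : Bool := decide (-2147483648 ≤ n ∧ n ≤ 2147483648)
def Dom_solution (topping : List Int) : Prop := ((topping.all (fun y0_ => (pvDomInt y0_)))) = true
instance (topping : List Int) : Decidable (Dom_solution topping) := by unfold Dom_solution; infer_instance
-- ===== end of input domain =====

-- B replaces A's single incremental pass (shrinking Counter + growing seen-dict) by two
-- precomputed distinct-count tables (prefix forward, suffix backward) and a comparison pass;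
-- same O(n) cost, different decomposition.

-- ===== PORT A =====
def solution (topping : List Int) : Int :=
  let yb0 : PySem.Dict Int Int :=
    topping.foldl (fun yb t => yb.insert t (yb.getD t 0 + 1)) PySem.Dict.empty
  let st := topping.foldl
    (fun (st : Int × PySem.Dict Int Int × PySem.Dict Int Bool) t =>
      let yb := st.2.1.modify t 0 (· - 1)        -- yb[t] -= 1 (defaultdict(int))
      let ob := st.2.2.insert t true             -- ob[t] = True
      let yb := if yb.getD t 0 = 0 then yb.erase t else yb   -- if yb[t] == 0: del yb[t]
      if yb.size = ob.size then (st.1 + 1, yb, ob) else (st.1, yb, ob))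
    (0, yb0, PySem.Dict.empty)
  st.1

-- ===== PORT B =====
def solution_alt (topping : List Int) : Int :=
  let p := topping.foldl
    (fun (st : PySem.Set Int × List Int) t =>
      let seen := PySem.Set.add st.1 t
      (seen, st.2 ++ [PySem.Set.len seen]))
    (PySem.Set.empty, [])
  let pref := p.2
  let q := topping.reverse.foldl
    (fun (st : PySem.Set Int × List Int) t =>
      let seen := PySem.Set.add st.1 t
      (seen, st.2 ++ [PySem.Set.len seen]))
    (PySem.Set.empty, [(0 : Int)])
  let suf := q.2.reverse
  (PySem.List.pyRange 0 topping.length 1).foldl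
    (fun answer i =>
      if PySem.List.pyGetD pref i 0 = PySem.List.pyGetD suf (i + 1) 0 then answer + 1
      else answer) 0

-- ===== PRECONDITION & SPEC =====
def Spec_solution (topping : List Int) (out : Int) : Prop := out = solution_alt topping
instance (topping : List Int) (out : Int) : Decidable (Spec_solution topping out) := by unfold Spec_solution; infer_instance

-- ===== CLAIM (what is proved, stated in full; the proofs are below) =====
def Claim_equal_solution : Prop := ∀ (topping : List Int), Dom_solution topping → Spec_solution topping (solution topping)

-- ===== LEMMAS AND PROOFS =====

def dLen (xs : List Int) : Nat := (PySem.Set.ofList xs).length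

def cnt : List Int → List Int → Nat
  | _, [] => 0
  | p, t :: l' => (if dLen (p ++ [t]) = dLen l' then 1 else 0) + cnt (p ++ [t]) l'

lemma length_eq_of_nodup_mem_iff {xs ys : List Int} (h1 : xs.Nodup) (h2 : ys.Nodup)
    (h : ∀ x, x ∈ xs ↔ x ∈ ys) : xs.length = ys.length :=
  ((List.perm_ext_iff_of_nodup h1 h2).mpr h).length_eq

lemma dLen_congr {xs ys : List Int} (h : ∀ x, x ∈ xs ↔ x ∈ ys) : dLen xs = dLen ys :=
  length_eq_of_nodup_mem_iff (PySem.Set.nodup_ofList xs) (PySem.Set.nodup_ofList ys)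
    (fun x => by rw [PySem.Set.mem_ofList, PySem.Set.mem_ofList]; exact h x)

-- facts about Dict.erase (PySem provides none)
lemma keys_erase_my (d : PySem.Dict Int Int) (k : Int) :
    (d.erase k).keys = d.keys.filter (fun x => !(x == k)) := by
  simp only [PySem.Dict.erase, PySem.Dict.keys, List.filter_map]
  rfl

lemma get?_erase_my (d : PySem.Dict Int Int) (k u : Int) :
    (d.erase k).get? u = if u = k then none else d.get? u := by
  obtain ⟨items⟩ := d
  simp only [PySem.Dict.erase, PySem.Dict.get?]
  induction items with
  | nil => simp
  | cons hd tl ih =>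
    by_cases h2 : u = k
    · subst h2
      by_cases h1 : hd.1 = u <;>
        simp [List.find?_cons, h1, ih]
    · have hku : (k == u) = false := by simp; omega
      have hp : (fun (a : Int × Int) => !decide (a.1 = k) && decide (a.1 = u))
          = (fun (a : Int × Int) => decide (a.1 = u)) := by
        funext a; by_cases h : a.1 = u <;> simp [h] <;> omega
      by_cases h1 : hd.1 = k
      · have : (hd.1 == u) = false := by simp [h1]; omega
        simp [List.find?_cons, h1, this, ih, h2, hku, hp]; rfl
      · by_cases h3 : hd.1 = u <;>
          (simp [List.find?_cons, h1, h3, ih, h2, hku, hp]; try rfl)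

lemma size_eq_keys_length {ν : Type} (d : PySem.Dict Int ν) : d.size = d.keys.length := by
  simp [PySem.Dict.size, PySem.Dict.keys]

lemma ofList_append_singleton (p : List Int) (t : Int) :
    PySem.Set.ofList (p ++ [t]) = PySem.Set.add (PySem.Set.ofList p) t := by
  simp [PySem.Set.ofList_eq_foldl, List.foldl_append]

lemma keys_insert_ofList (ob : PySem.Dict Int Bool) (p : List Int) (t : Int)
    (h : ob.keys = PySem.Set.ofList p) :
    (ob.insert t true).keys = PySem.Set.ofList (p ++ [t]) := by
  rw [ofList_append_singleton]
  by_cases hc : ob.contains t = true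
  · rw [PySem.Dict.keys_insert_of_contains ob true hc, h]
    have ht : t ∈ PySem.Set.ofList p := by
      rw [← h]; exact (PySem.Dict.contains_iff_mem_keys ob t).mp hc
    rw [PySem.Set.add]
    simp [PySem.Set.contains, ht]
  · have hnc : ob.contains t = false := by simpa using hc
    rw [PySem.Dict.keys_insert_of_not_contains ob true hnc, h, PySem.Set.add]
    have ht : t ∉ PySem.Set.ofList p := by
      rw [← h]
      intro hm
      exact hc ((PySem.Dict.contains_iff_mem_keys ob t).mpr hm)
    simp [PySem.Set.contains, ht]

def prefTable (s : PySem.Set Int) : List Int → List Int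
  | [] => []
  | t :: l' => PySem.Set.len (PySem.Set.add s t) :: prefTable (PySem.Set.add s t) l'

lemma foldB (l : List Int) : ∀ (s : PySem.Set Int) (acc : List Int),
    (l.foldl
      (fun (st : PySem.Set Int × List Int) t =>
        let seen := PySem.Set.add st.1 t
        (seen, st.2 ++ [PySem.Set.len seen])) (s, acc))
    = (PySem.Set.update s l, acc ++ prefTable s l) := by
  induction l with
  | nil => intro s acc; simp [prefTable, PySem.Set.update]
  | cons t l' ih =>
    intro s acc
    simp only [List.foldl_cons, prefTable, PySem.Set.update]
    rw [ih]
    simp [PySem.Set.update]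

lemma prefTable_length (l : List Int) : ∀ s, (prefTable s l).length = l.length := by
  induction l with
  | nil => intro s; rfl
  | cons t l' ih => intro s; simp [prefTable, ih]

lemma prefTable_getElem (l : List Int) : ∀ (s : PySem.Set Int) (i : Nat), i < l.length →
    (prefTable s l)[i]? = some (PySem.Set.len (PySem.Set.update s (l.take (i + 1)))) := by
  induction l with
  | nil => intro s i h; simp at h
  | cons t l' ih =>
    intro s i h
    cases i with
    | zero => simp [prefTable, PySem.Set.update]
    | succ i =>
      simp only [prefTable, List.getElem?_cons_succ, List.take_succ_cons]
      rw [ih _ i (by simpa using h)]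
      rfl

lemma cnt_eq_countP (l : List Int) : ∀ p, cnt p l =
    (List.range l.length).countP
      (fun k => decide (dLen (p ++ l.take (k + 1)) = dLen (l.drop (k + 1)))) := by
  induction l with
  | nil => intro p; rfl
  | cons t l' ih =>
    intro p
    simp only [cnt, List.length_cons, List.range_succ_eq_map, List.countP_cons, List.countP_map]
    rw [ih (p ++ [t])]
    simp only [List.take_succ_cons, List.drop_succ_cons, List.take_zero, List.drop_zero]
    conv_rhs => rw [Nat.add_comm]
    congr 1
    · simp
    · congr 1
      funext k
      simp [Function.comp, Nat.succ_eq_add_one]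

lemma update_empty (l : List Int) : PySem.Set.update [] l = PySem.Set.ofList l := by
  rw [PySem.Set.ofList_eq_foldl]; rfl

lemma prefTable_get_dLen (l : List Int) (i : Nat) (h : i < l.length) :
    (prefTable [] l)[i]? = some ((dLen (l.take (i + 1)) : Int)) := by
  rw [prefTable_getElem l [] i h, update_empty]
  rfl

lemma suf_get (l : List Int) (j : Nat) (hj : j ≤ l.length) :
    ((prefTable [] l.reverse).reverse ++ [(0 : Int)])[j]? = some ((dLen (l.drop j) : Int)) := by
  have hlen : (prefTable [] l.reverse).length = l.length := by
    rw [prefTable_length]; exact List.length_reverse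
  rcases Nat.lt_or_ge j l.length with hlt | hge
  · rw [List.getElem?_append_left (by simpa [hlen] using hlt)]
    rw [List.getElem?_reverse (by simpa [hlen] using hlt)]
    have hidx : (prefTable [] l.reverse).length - 1 - j = l.length - 1 - j := by rw [hlen]
    rw [hidx]
    have hbound : l.length - 1 - j < l.reverse.length := by
      simp; omega
    rw [prefTable_get_dLen l.reverse _ hbound]
    have htake : l.length - 1 - j + 1 = l.length - j := by omega
    rw [htake]
    have hsub : l.length - (l.length - j) = j := by omega
    have : l.reverse.take (l.length - j) = (l.drop j).reverse := by
      rw [List.take_reverse, hsub]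
    rw [this]
    have : dLen (l.drop j).reverse = dLen (l.drop j) :=
      dLen_congr (fun x => List.mem_reverse)
    rw [this]
  · have hj' : j = l.length := le_antisymm hj hge
    subst hj'
    rw [List.getElem?_append_right (by simp [hlen])]
    simp [hlen, dLen, PySem.Set.ofList]

lemma A_loop (l : List Int) : ∀ (p : List Int) (ans : Int)
    (yb : PySem.Dict Int Int) (ob : PySem.Dict Int Bool),
    yb.keys.Nodup →
    (∀ t, t ∈ yb.keys ↔ t ∈ l) →
    (∀ t, yb.getD t 0 = l.count t) →
    ob.keys = PySem.Set.ofList p →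
    (l.foldl
      (fun (st : Int × PySem.Dict Int Int × PySem.Dict Int Bool) t =>
        let yb := st.2.1.modify t 0 (· - 1)
        let ob := st.2.2.insert t true
        let yb := if yb.getD t 0 = 0 then yb.erase t else yb
        if yb.size = ob.size then (st.1 + 1, yb, ob) else (st.1, yb, ob))
      (ans, yb, ob)).1 = ans + cnt p l := by
  induction l with
  | nil => intro p ans yb ob _ _ _ _; simp [cnt]
  | cons t l' ih =>
    intro p ans yb ob hnd hmem hcnt hob
    have htk : t ∈ yb.keys := (hmem t).mpr (List.mem_cons_self)
    have hc : yb.contains t = true := (PySem.Dict.contains_iff_mem_keys yb t).mpr htk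
    have hyb1keys : (yb.modify t 0 (· - 1)).keys = yb.keys := by
      rw [PySem.Dict.keys_modify]
      exact PySem.Dict.keys_insert_of_contains yb _ hc
    have hyb1getD : ∀ u, (yb.modify t 0 (· - 1)).getD u 0 = l'.count u := by
      intro u
      rw [PySem.Dict.getD_modify]
      by_cases hu : u = t
      · subst hu
        rw [if_pos rfl, hcnt]
        simp [List.count_cons_self]
      · rw [if_neg hu, hcnt]; have hu2 : t ≠ u := fun h => hu h.symm; simp [hu2]
    have hob1 : (ob.insert t true).keys = PySem.Set.ofList (p ++ [t]) :=
      keys_insert_ofList ob p t hob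
    have hso : (ob.insert t true).size = dLen (p ++ [t]) := by
      rw [size_eq_keys_length, hob1]; rfl
    simp only [List.foldl_cons]
    by_cases hz : (yb.modify t 0 (· - 1)).getD t 0 = 0
    · -- t not in l'
      have htl' : t ∉ l' := by
        have := hyb1getD t
        rw [hz] at this
        have : l'.count t = 0 := by exact_mod_cast this.symm
        exact List.count_eq_zero.mp this
      have hk2 : ((yb.modify t 0 (· - 1)).erase t).keys
          = yb.keys.filter (fun x => !(x == t)) := by
        rw [keys_erase_my, hyb1keys]
      have hnd2 : ((yb.modify t 0 (· - 1)).erase t).keys.Nodup := by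
        rw [hk2]; exact hnd.filter _
      have hmem2 : ∀ u, u ∈ ((yb.modify t 0 (· - 1)).erase t).keys ↔ u ∈ l' := by
        intro u
        rw [hk2, List.mem_filter]
        constructor
        · rintro ⟨hu, hne⟩
          have : u ∈ t :: l' := (hmem u).mp hu
          rcases this with _ | h
          · simp at hne
          · assumption
        · intro hu
          refine ⟨(hmem u).mpr (List.mem_cons_of_mem _ hu), ?_⟩
          have : u ≠ t := fun h => htl' (h ▸ hu)
          simp [this]
      have hcnt2 : ∀ u, ((yb.modify t 0 (· - 1)).erase t).getD u 0 = l'.count u := by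
        intro u
        rw [PySem.Dict.getD_eq_get?_getD, get?_erase_my]
        by_cases hu : u = t
        · subst hu
          rw [if_pos rfl]
          simp [List.count_eq_zero.mpr htl']
        · rw [if_neg hu, ← PySem.Dict.getD_eq_get?_getD, hyb1getD]
      have hsy : ((yb.modify t 0 (· - 1)).erase t).size = dLen l' := by
        rw [size_eq_keys_length]
        exact length_eq_of_nodup_mem_iff hnd2 (PySem.Set.nodup_ofList l')
          (fun u => by rw [hmem2, PySem.Set.mem_ofList])
      rw [if_pos hz]
      by_cases hd : dLen (p ++ [t]) = dLen l'
      · rw [if_pos (by rw [hsy, hso, hd])]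
        rw [ih (p ++ [t]) (ans + 1) _ _ hnd2 hmem2 hcnt2 hob1]
        simp [cnt, if_pos hd]
        ring
      · rw [if_neg (by rw [hsy, hso]; exact fun h => hd h.symm)]
        rw [ih (p ++ [t]) ans _ _ hnd2 hmem2 hcnt2 hob1]
        simp [cnt, if_neg hd]
    · -- t still in l'
      have htl' : t ∈ l' := by
        by_contra hno
        exact hz (by rw [hyb1getD, List.count_eq_zero.mpr hno]; rfl)
      have hnd2 : (yb.modify t 0 (· - 1)).keys.Nodup := by rw [hyb1keys]; exact hnd
      have hmem2 : ∀ u, u ∈ (yb.modify t 0 (· - 1)).keys ↔ u ∈ l' := by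
        intro u
        rw [hyb1keys, hmem]
        constructor
        · rintro (_ | h)
          · exact htl'
          · assumption
        · exact List.mem_cons_of_mem _
      have hsy : (yb.modify t 0 (· - 1)).size = dLen l' := by
        rw [size_eq_keys_length]
        exact length_eq_of_nodup_mem_iff hnd2 (PySem.Set.nodup_ofList l')
          (fun u => by rw [hmem2, PySem.Set.mem_ofList])
      rw [if_neg hz]
      by_cases hd : dLen (p ++ [t]) = dLen l'
      · rw [if_pos (by rw [hsy, hso, hd])]
        rw [ih (p ++ [t]) (ans + 1) _ _ hnd2 hmem2 hyb1getD hob1]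
        simp [cnt, if_pos hd]
        ring
      · rw [if_neg (by rw [hsy, hso]; exact fun h => hd h.symm)]
        rw [ih (p ++ [t]) ans _ _ hnd2 hmem2 hyb1getD hob1]
        simp [cnt, if_neg hd]

lemma solution_eq_cnt (topping : List Int) : solution topping = cnt [] topping := by
  unfold solution
  rw [PySem.Dict.foldl_insert_getD_add_one_eq_counter]
  rw [A_loop topping [] 0 (PySem.Dict.counter topping) PySem.Dict.empty
    (PySem.Dict.nodup_keys_counter topping)
    (fun t => by rw [PySem.Dict.keys_counter, PySem.Set.mem_ofList])
    (fun t => PySem.Dict.getD_counter topping t)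
    rfl]
  simp

lemma solution_alt_eq_cnt (topping : List Int) : solution_alt topping = cnt [] topping := by
  unfold solution_alt
  rw [foldB, foldB]
  simp only [List.nil_append]
  rw [PySem.List.foldl_congr_mem _ _
      (fun (answer : Int) (i : Int) =>
        if (decide (dLen (topping.take (i.toNat + 1)) = dLen (topping.drop (i.toNat + 1)))) = true
        then answer + 1 else answer) 0 ?_]
  · rw [PySem.List.foldl_count_if, PySem.List.pyRange_one]
    simp only [sub_zero, Int.toNat_natCast, List.countP_map]
    rw [cnt_eq_countP topping []]
    simp only [List.nil_append, zero_add]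
    have hco : ((fun i : Int => decide (dLen (List.take (i.toNat + 1) topping) = dLen (List.drop (i.toNat + 1) topping))) ∘ fun k : Nat => (k : Int))
        = (fun k : Nat => decide (dLen (List.take (k + 1) topping) = dLen (List.drop (k + 1) topping))) := by
      funext k
      simp [Function.comp]
    rw [hco]
    rfl
  · intro acc i hi
    obtain ⟨h0, h1⟩ := PySem.List.mem_pyRange_one.mp hi
    have hlt : i.toNat < topping.length := by omega
    have hpl : i < ((prefTable PySem.Set.empty topping).length : Int) := by
      rw [prefTable_length]; simpa using h1
    have hpref : PySem.List.pyGetD (prefTable PySem.Set.empty topping) i 0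
        = (dLen (topping.take (i.toNat + 1)) : Int) := by
      rw [PySem.List.pyGetD_eq_getElem _ _ h0 hpl]
      have h2 := prefTable_get_dLen topping i.toNat hlt
      rw [List.getElem?_eq_getElem (by rw [prefTable_length]; exact hlt)] at h2
      exact Option.some.inj h2
    have hrev : (([(0 : Int)] ++ prefTable PySem.Set.empty topping.reverse)).reverse
        = (prefTable [] topping.reverse).reverse ++ [(0 : Int)] := by
      simp
    have hsuflen : ((([(0 : Int)] ++ prefTable PySem.Set.empty topping.reverse)).reverse).length
        = topping.length + 1 := by
      simp [prefTable_length]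
    have hsuf : PySem.List.pyGetD ((([(0 : Int)] ++ prefTable PySem.Set.empty topping.reverse)).reverse) (i + 1) 0
        = (dLen (topping.drop (i.toNat + 1)) : Int) := by
      rw [PySem.List.pyGetD_eq_getElem _ _ (by omega) (by rw [hsuflen]; push_cast; omega)]
      have ht : (i + 1).toNat = i.toNat + 1 := by omega
      have h2 := suf_get topping (i.toNat + 1) (by omega)
      rw [← hrev] at h2
      rw [List.getElem?_eq_getElem (by rw [hsuflen]; omega)] at h2
      simp only [ht]
      exact Option.some.inj h2
    simp only [hpref, hsuf]
    simp

-- ===== VERDICT (by name: the statement is the Claim_ definition above) =====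
theorem solution_spec : Claim_equal_solution := by
  intro topping _
  unfold Spec_solution
  rw [solution_eq_cnt, solution_alt_eq_cnt]
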